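-- pv_equiv track=rewrite | github.com/qifanyyy/JupyterNotebook | new_algs/Sequence+algorithms/Needleman-Wunsch+algorithm/needleman_wunsch.py | matrix_initialization
-- ===== SOURCE A (Python) =====
-- GAP = -4
--
-- def matrix_initialization(seq1, seq2):
--     nbr_lines = len(seq1) + 1
--     nbr_columns = len(seq2) + 1
--     score_matrix = [[0] * nbr_columns for i in range(nbr_lines)]
--     traceback_matrix = [[(0, 0)] * nbr_columns for i in range(nbr_lines)]
--
--     for i in range(1, nbr_columns):
--         score_matrix[0][i] += GAP + score_matrix[0][i - 1]
--         traceback_matrix[0][i] = (0, i - 1)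
--
--     for i in range(1, nbr_lines):
--         score_matrix[i][0] += GAP + score_matrix[i - 1][0]
--         traceback_matrix[i][0] = (i - 1, 0)
--
--     return score_matrix, traceback_matrix
-- ===== SOURCE B (Python) =====
-- GAP = -4
--
-- def matrix_initialization(seq1, seq2):
--     n, m = len(seq1), len(seq2)
--     score_matrix = [[GAP * j if i == 0 else GAP * i if j == 0 else 0
--                      for j in range(m + 1)] for i in range(n + 1)]
--     traceback_matrix = [[(0, 0) if i == 0 and j == 0
--                          else (0, j - 1) if i == 0
--                          else (i - 1, 0) if j == 0
--                          else (0, 0)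
--                          for j in range(m + 1)] for i in range(n + 1)]
--     return score_matrix, traceback_matrix
-- ===== Notes on version B (the rewrite author's own statement) =====
-- stated objective: simpler
-- what changed: B builds both matrices in one shot with nested comprehensions that compute every cell by a closed form (GAP*j / GAP*i on the borders, traceback pointers directly), instead of allocating zero matrices and then filling the first row and first column with two accumulating loops of in-place updates.
import Mathlib
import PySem

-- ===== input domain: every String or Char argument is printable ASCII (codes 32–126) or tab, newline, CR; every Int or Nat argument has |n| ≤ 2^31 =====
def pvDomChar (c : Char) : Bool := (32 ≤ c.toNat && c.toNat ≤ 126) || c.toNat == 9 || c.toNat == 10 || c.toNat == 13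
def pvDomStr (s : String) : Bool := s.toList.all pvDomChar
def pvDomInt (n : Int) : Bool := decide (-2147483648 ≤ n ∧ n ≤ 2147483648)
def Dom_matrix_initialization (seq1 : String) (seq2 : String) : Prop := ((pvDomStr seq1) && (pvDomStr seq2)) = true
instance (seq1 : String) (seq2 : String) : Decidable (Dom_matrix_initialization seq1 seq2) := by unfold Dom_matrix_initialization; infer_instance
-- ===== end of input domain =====

-- B replaces A's border fill loops by nested comprehensions computing every cell in closed form (objective: simpler).

-- ===== PORT A =====
def GAPv : Int := -4

-- one iteration of A's first loop: score_matrix[0][i] += GAP + score_matrix[0][i-1]; traceback_matrix[0][i] = (0, i-1)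
-- (indices are in range, so List.set / List.getD are exact for Python's item assignment / indexing)
def pvStep1 (p : List (List Int) × List (List (Int × Int))) (i : Nat) :
    List (List Int) × List (List (Int × Int)) :=
  let r := p.1.getD 0 []
  let s := p.1.set 0 (r.set i (r.getD i 0 + (GAPv + r.getD (i - 1) 0)))
  let tr := p.2.getD 0 []
  let t := p.2.set 0 (tr.set i ((0 : Int), (i : Int) - 1))
  (s, t)

-- one iteration of A's second loop: score_matrix[i][0] += GAP + score_matrix[i-1][0]; traceback_matrix[i][0] = (i-1, 0)
def pvStep2 (p : List (List Int) × List (List (Int × Int))) (i : Nat) :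
    List (List Int) × List (List (Int × Int)) :=
  let ri := p.1.getD i []
  let rp := p.1.getD (i - 1) []
  let s := p.1.set i (ri.set 0 (ri.getD 0 0 + (GAPv + rp.getD 0 0)))
  let ti := p.2.getD i []
  let t := p.2.set i (ti.set 0 ((i : Int) - 1, (0 : Int)))
  (s, t)

-- A's body on the two sizes (nbr_lines, nbr_columns); range(1, n) = List.range' 1 (n-1)
def pvCoreA (nl nc : Nat) : List (List Int) × List (List (Int × Int)) :=
  let score0 := (List.range nl).map (fun _ => List.replicate nc (0 : Int))
  let tb0 := (List.range nl).map (fun _ => List.replicate nc ((0 : Int), (0 : Int)))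
  let p1 := (List.range' 1 (nc - 1)).foldl pvStep1 (score0, tb0)
  (List.range' 1 (nl - 1)).foldl pvStep2 p1

def matrix_initialization (seq1 : String) (seq2 : String) : List (List Int) × (List (List (Int × Int))) :=
  pvCoreA (seq1.toList.length + 1) (seq2.toList.length + 1)

-- ===== PORT B =====
-- B's body: both matrices as nested comprehensions, each cell by closed form
def pvCoreB (n m : Nat) : List (List Int) × List (List (Int × Int)) :=
  ((List.range (n + 1)).map (fun (i : Nat) => (List.range (m + 1)).map (fun (j : Nat) =>
      if i = 0 then GAPv * (j : Int) else if j = 0 then GAPv * (i : Int) else 0)),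
   (List.range (n + 1)).map (fun (i : Nat) => (List.range (m + 1)).map (fun (j : Nat) =>
      if i = 0 ∧ j = 0 then ((0 : Int), (0 : Int))
      else if i = 0 then ((0 : Int), (j : Int) - 1)
      else if j = 0 then ((i : Int) - 1, (0 : Int))
      else ((0 : Int), (0 : Int)))))

def matrix_initialization_alt (seq1 : String) (seq2 : String) : List (List Int) × (List (List (Int × Int))) :=
  pvCoreB seq1.toList.length seq2.toList.length

-- ===== PRECONDITION & SPEC =====
def Spec_matrix_initialization (seq1 : String) (seq2 : String) (out : List (List Int) × (List (List (Int × Int)))) : Prop := out = matrix_initialization_alt seq1 seq2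
instance (seq1 : String) (seq2 : String) (out : List (List Int) × (List (List (Int × Int)))) : Decidable (Spec_matrix_initialization seq1 seq2 out) := by unfold Spec_matrix_initialization; infer_instance

-- ===== CLAIM (what is proved, stated in full; the proofs are below) =====
def Claim_equal_matrix_initialization : Prop := ∀ (seq1 : String) (seq2 : String), Dom_matrix_initialization seq1 seq2 → Spec_matrix_initialization seq1 seq2 (matrix_initialization seq1 seq2)

-- ===== LEMMAS AND PROOFS =====

-- setting an in-range cell of a mapped range is remapping with the updated function
theorem set_map_range {α : Type} (N j : Nat) (f : Nat → α) (v : α) (hj : j < N) :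
    ((List.range N).map f).set j v = (List.range N).map (fun x => if x = j then v else f x) := by
  apply List.ext_getElem
  · simp
  · intro i h1 h2
    simp only [List.getElem_set, List.getElem_map, List.getElem_range]
    by_cases h : i = j
    · subst h; simp
    · rw [if_neg (fun hh => h hh.symm), if_neg h]

-- invariant of A's first loop: after k steps row 0 carries the closed forms, the tail is untouched
theorem loop1_inv (m k : Nat) (hk : k ≤ m)
    (rs : List (List Int)) (ts : List (List (Int × Int))) :
    (List.range' 1 k).foldl pvStep1
      ((List.range (m + 1)).map (fun (j : Nat) => if j ≤ 0 then GAPv * (j : Int) else 0) :: rs,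
       (List.range (m + 1)).map (fun (j : Nat) => if 1 ≤ j ∧ j ≤ 0 then ((0 : Int), (j : Int) - 1) else ((0 : Int), (0 : Int))) :: ts)
    = ((List.range (m + 1)).map (fun (j : Nat) => if j ≤ k then GAPv * (j : Int) else 0) :: rs,
       (List.range (m + 1)).map (fun (j : Nat) => if 1 ≤ j ∧ j ≤ k then ((0 : Int), (j : Int) - 1) else ((0 : Int), (0 : Int))) :: ts) := by
  induction k with
  | zero => rfl
  | succ k ih =>
    rw [List.range'_1_concat, List.foldl_append, ih (by omega)]
    simp only [List.foldl_cons, List.foldl_nil, pvStep1, List.getD_cons_zero, List.set_cons_zero]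
    have h1 : 1 + k - 1 = k := by omega
    have h2 : 1 + k < m + 1 := by omega
    rw [h1]
    rw [PySem.List.getD_map_range _ _ _ _ h2, PySem.List.getD_map_range _ _ _ _ (by omega : k < m + 1)]
    rw [set_map_range _ _ _ _ h2, set_map_range _ _ _ _ h2]
    simp only [Prod.mk.injEq]
    constructor <;>
    · congr 1
      apply List.map_congr_left
      intro j hj
      split_ifs <;> first
        | rfl
        | (exfalso; omega)
        | (subst_vars; push_cast; ring)

-- invariant of A's second loop: after k steps rows 1..k of the tail carry the closed forms
theorem loop2_inv (n m k : Nat) (hk : k ≤ n)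
    (r0 : List Int) (t0 : List (Int × Int)) (h0 : r0.getD 0 0 = 0) :
    (List.range' 1 k).foldl pvStep2
      (r0 :: (List.range n).map (fun (x : Nat) => if x < 0 then GAPv * ((x : Int) + 1) :: List.replicate m 0 else List.replicate (m + 1) (0 : Int)),
       t0 :: (List.range n).map (fun (x : Nat) => if x < 0 then ((x : Int), (0 : Int)) :: List.replicate m ((0 : Int), (0 : Int)) else List.replicate (m + 1) ((0 : Int), (0 : Int))))
    = (r0 :: (List.range n).map (fun (x : Nat) => if x < k then GAPv * ((x : Int) + 1) :: List.replicate m 0 else List.replicate (m + 1) (0 : Int)),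
       t0 :: (List.range n).map (fun (x : Nat) => if x < k then ((x : Int), (0 : Int)) :: List.replicate m ((0 : Int), (0 : Int)) else List.replicate (m + 1) ((0 : Int), (0 : Int)))) := by
  induction k with
  | zero => rfl
  | succ k ih =>
    rw [List.range'_1_concat, List.foldl_append, ih (by omega)]
    simp only [List.foldl_cons, List.foldl_nil, pvStep2]
    have h1 : 1 + k - 1 = k := by omega
    have hkn : k < n := by omega
    have e1 : (1 + k) = (k + 1) := by omega
    rw [h1, e1]
    rw [List.getD_cons_succ, List.getD_cons_succ,
        PySem.List.getD_map_range _ _ _ _ hkn, PySem.List.getD_map_range _ _ _ _ hkn]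
    have hprev : ((r0 :: (List.range n).map (fun (x : Nat) => if x < k then GAPv * ((x : Int) + 1) :: List.replicate m 0 else List.replicate (m + 1) (0 : Int))).getD k []).getD 0 0 = GAPv * (k : Int) := by
      cases k with
      | zero => simpa using h0
      | succ k' =>
        rw [List.getD_cons_succ, PySem.List.getD_map_range _ _ _ _ (by omega : k' < n)]
        simp only [if_pos (by omega : k' < k' + 1)]
        simp
    rw [hprev]
    simp only [if_neg (by omega : ¬ k < k), List.set_cons_succ]
    rw [set_map_range _ _ _ _ hkn, set_map_range _ _ _ _ hkn]
    simp only [Prod.mk.injEq]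
    constructor <;>
    · congr 1
      apply List.map_congr_left
      intro x hx
      split_ifs with hA hB <;> first
        | rfl
        | (exfalso; omega)
        | (subst hA
           cases m <;> simp [List.replicate_succ] <;> ring_nf)

-- map over a range whose function is constant on the range
theorem map_range_eq_replicate {α : Type} (N : Nat) (f : Nat → α) (c : α)
    (h : ∀ j, j < N → f j = c) : (List.range N).map f = List.replicate N c := by
  apply List.ext_getElem
  · simp
  · intro i h1 h2
    simp only [List.getElem_map, List.getElem_range, List.getElem_replicate]
    exact h i (by simpa using h1)

-- peel the first element off a map over range (N+1)
theorem map_range_succ_cons {α : Type} (N : Nat) (f : Nat → α) :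
    (List.range (N + 1)).map f = f 0 :: (List.range N).map (fun x => f (x + 1)) := by
  rw [List.range_succ_eq_map, List.map_cons, List.map_map]
  rfl

-- the whole computation, over the two lengths
theorem core_eq (n m : Nat) : pvCoreA (n + 1) (m + 1) = pvCoreB n m := by
  unfold pvCoreA pvCoreB
  simp only [Nat.add_sub_cancel]
  -- bring the initial matrices to the shape of loop1_inv's start state
  have e1 : (List.range (n + 1)).map (fun _ => List.replicate (m + 1) (0 : Int))
      = (List.range (m + 1)).map (fun (j : Nat) => if j ≤ 0 then GAPv * (j : Int) else 0)
        :: (List.range n).map (fun (x : Nat) => if x < 0 then GAPv * ((x : Int) + 1) :: List.replicate m 0 else List.replicate (m + 1) (0 : Int)) := by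
    rw [map_range_succ_cons]
    congr 1
    rw [map_range_eq_replicate _ _ (0 : Int) (fun j hj => by
        split_ifs with h
        · simp [Nat.le_zero.mp h]
        · rfl)]
  have e2 : (List.range (n + 1)).map (fun _ => List.replicate (m + 1) ((0 : Int), (0 : Int)))
      = (List.range (m + 1)).map (fun (j : Nat) => if 1 ≤ j ∧ j ≤ 0 then ((0 : Int), (j : Int) - 1) else ((0 : Int), (0 : Int)))
        :: (List.range n).map (fun (x : Nat) => if x < 0 then ((x : Int), (0 : Int)) :: List.replicate m ((0 : Int), (0 : Int)) else List.replicate (m + 1) ((0 : Int), (0 : Int))) := by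
    rw [map_range_succ_cons]
    congr 1
    rw [map_range_eq_replicate _ _ ((0 : Int), (0 : Int)) (fun j hj => by
        split_ifs with h
        · omega
        · rfl)]
  rw [e1, e2, loop1_inv m m (le_refl m),
      loop2_inv n m n (le_refl n) _ _ (by
        rw [PySem.List.getD_map_range _ _ _ _ (by omega : 0 < m + 1)]
        simp)]
  -- now compare with B's comprehensions, row by row
  simp only [Prod.mk.injEq]
  constructor
  · rw [map_range_succ_cons n (fun i => (List.range (m + 1)).map (fun (j : Nat) =>
        if i = 0 then GAPv * (j : Int) else if j = 0 then GAPv * (i : Int) else 0))]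
    refine List.cons_eq_cons.mpr ⟨?_, ?_⟩
    · apply List.map_congr_left
      intro j hj
      have hjm : j ≤ m := by simpa [Nat.lt_succ_iff] using hj
      simp [hjm]
    · apply List.map_congr_left
      intro x hx
      have hxn : x < n := by simpa using hx
      rw [if_pos hxn]
      apply List.ext_getElem
      · simp
      · intro i h1 h2
        simp only [List.getElem_map, List.getElem_range]
        cases i with
        | zero =>
          simp only [List.getElem_cons_zero, if_neg (by omega : ¬ x + 1 = 0)]
          push_cast
          ring
        | succ i =>
          simp only [List.getElem_cons_succ, List.getElem_replicate,
            if_neg (by omega : ¬ x + 1 = 0), if_neg (by omega : ¬ i + 1 = 0)]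
  · rw [map_range_succ_cons n (fun i => (List.range (m + 1)).map (fun (j : Nat) =>
        if i = 0 ∧ j = 0 then ((0 : Int), (0 : Int))
        else if i = 0 then ((0 : Int), (j : Int) - 1)
        else if j = 0 then ((i : Int) - 1, (0 : Int))
        else ((0 : Int), (0 : Int))))]
    refine List.cons_eq_cons.mpr ⟨?_, ?_⟩
    · apply List.map_congr_left
      intro j hj
      have hjm : j ≤ m := by simpa [Nat.lt_succ_iff] using hj
      by_cases h0 : j = 0
      · simp [h0]
      · have h1 : 1 ≤ j := by omega
        simp [h0, h1, hjm]
    · apply List.map_congr_left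
      intro x hx
      have hxn : x < n := by simpa using hx
      rw [if_pos hxn]
      apply List.ext_getElem
      · simp
      · intro i h1 h2
        simp only [List.getElem_map, List.getElem_range]
        cases i with
        | zero =>
          simp only [List.getElem_cons_zero, if_neg (by omega : ¬ x + 1 = 0)]
          have hc : ((x + 1 : Nat) : Int) - 1 = (x : Int) := by push_cast; ring
          rw [hc]
          simp
        | succ i =>
          simp only [List.getElem_cons_succ, List.getElem_replicate,
            if_neg (by omega : ¬ (x + 1 = 0 ∧ i + 1 = 0)), if_neg (by omega : ¬ x + 1 = 0),
            if_neg (by omega : ¬ i + 1 = 0)]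

-- ===== VERDICT (by name: the statement is the Claim_ definition above) =====
theorem matrix_initialization_spec : Claim_equal_matrix_initialization := by
  intro seq1 seq2 _
  unfold Spec_matrix_initialization matrix_initialization matrix_initialization_alt
  exact core_eq _ _
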